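-- pv_equiv track=rewrite | github.com/pshel1702/additional-list-operations | lists.py | find_common_items_minimum_index_sum
-- ===== SOURCE A (Python) =====
-- def find_common_items_minimum_index_sum(list1, list2):
--     """
--     Returns the common item(s) between the two lists which have the lowest index sum
--     (the sum of the index of the item in each list.) If there is a tie, return all
--     items with the lowest index sum.
--
--     """
--
--     #Start with sum = 0
--     #Loop through the lists to find matches
--     #If match is found, add the indices.
--     #Return option with least list index sum
--     #If multiple matches are found with the same sum, return the list with no
--     #particular order requirement
--
--     temp_sum = 0
--     final_list=[]
--     for i in range(len(list1)):
--         j=0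
--         while j<len(list2) and (list1[i] != list2[j]):
--             j+=1
--         if temp_sum == 0 or temp_sum == i+j:
--             temp_sum = i+j
--             final_list.append(list1[i])
--         elif (i+j) < temp_sum :
--             temp_sum = i+j
--             final_list[:] = [list1[i]]
--
--     return final_list
-- ===== SOURCE B (Python) =====
-- def find_common_items_minimum_index_sum(list1, list2):
--     # Staged computation instead of A's running-minimum state machine:
--     # build a value -> first-index map for list2 once, compute every
--     # element's index sum in one pass (an absent value counts as index
--     # len(list2), matching A's exhausted inner scan), then take the
--     # minimum and keep the elements that attain it, in order.
--     if not list1: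
--         return []
--     first = {}
--     for j, v in enumerate(list2):
--         first.setdefault(v, j)
--     missing = len(list2)
--     sums = [i + first.get(v, missing) for i, v in enumerate(list1)]
--     best = min(sums)
--     return [v for v, s in zip(list1, sums) if s == best]
-- ===== Notes on version B (the rewrite author's own statement) =====
-- stated objective: faster
-- what changed: A is a one-pass running-minimum state machine with an inner O(m) rescan of list2 per element; B is staged: build a value->first-index map of list2 once, materialise all index sums in one pass, take min(sums), and filter the elements attaining it.
-- intended difference: On inputs where list1 has at least two elements and its first element has index sum 0 (list2 is empty or starts with the same value), A's 'temp_sum == 0' sentinel re-fires on the second element and A appends items that do not have the minimal index sum (e.g. A([1,2],[1]) = [1,2]); B returns exactly the items with minimal index sum ([1]), which is what the docstring specifies. — e.g. on find_common_items_minimum_index_sum([1, 2], [1]): A returns [1, 2], B returns [1]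
import Mathlib
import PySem

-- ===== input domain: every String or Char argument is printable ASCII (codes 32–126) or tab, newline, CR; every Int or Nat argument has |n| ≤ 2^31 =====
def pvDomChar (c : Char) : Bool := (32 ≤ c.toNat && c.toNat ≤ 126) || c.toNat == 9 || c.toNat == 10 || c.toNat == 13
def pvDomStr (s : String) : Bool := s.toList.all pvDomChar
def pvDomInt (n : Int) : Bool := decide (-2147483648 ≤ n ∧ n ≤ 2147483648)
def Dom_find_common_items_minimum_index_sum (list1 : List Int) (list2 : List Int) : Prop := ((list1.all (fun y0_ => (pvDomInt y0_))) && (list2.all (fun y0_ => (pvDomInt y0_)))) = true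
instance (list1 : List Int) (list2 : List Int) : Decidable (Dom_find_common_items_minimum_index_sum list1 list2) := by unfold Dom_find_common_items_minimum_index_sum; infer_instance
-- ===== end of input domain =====

-- B replaces A's running-minimum state machine (with inner O(m) rescans) by a staged
-- map/min/filter pipeline over precomputed index sums; on the inputs in D_ below A's
-- zero sentinel misfires and B returns the intended minimal-index-sum items.

-- ===== PORT A =====
-- inner while loop: j = 0; while j < len(list2) and (list1[i] != list2[j]): j += 1
-- (the index-advancing while loop is the scan of list2 from the front; structural so it computes)
def pvWhileJ (v : Int) (list2 : List Int) : Nat :=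
  match list2 with
  | [] => 0
  | x :: xs => if v ≠ x then pvWhileJ v xs + 1 else 0

def find_common_items_minimum_index_sum (list1 : List Int) (list2 : List Int) : List Int :=
  ((PySem.List.pyRange 0 (PySem.List.len list1) 1).foldl
    (fun (st : Int × List Int) i =>
      let v := PySem.List.pyGetD list1 i 0
      let s : Int := i + (pvWhileJ v list2 : Int)
      if st.1 = 0 ∨ st.1 = s then (s, st.2 ++ [v])
      else if s < st.1 then (s, [v])
      else st)
    (0, [])).2

-- ===== PORT B =====
-- first = {}; for j, v in enumerate(list2): first.setdefault(v, j)
def pvFirstIndex (list2 : List Int) : PySem.Dict Int Int :=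
  (PySem.List.enumerate list2 0).foldl (fun d p => d.setdefault p.2 p.1) PySem.Dict.empty

def find_common_items_minimum_index_sum_alt (list1 : List Int) (list2 : List Int) : List Int :=
  if list1 = [] then []
  else
    let first := pvFirstIndex list2
    let missing : Int := PySem.List.len list2
    let sums := (PySem.List.enumerate list1 0).map (fun p => p.1 + first.getD p.2 missing)
    -- min(sums): sums is nonempty here, so min? is some; .getD 0 is unreachable
    let best := (PySem.List.min? sums (fun x => x)).getD 0
    ((list1.zip sums).filter (fun q => q.2 == best)).map Prod.fst

-- ===== PRECONDITION & SPEC =====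
-- On inputs where list1 has ≥ 2 elements and its first element has index sum 0 (list2
-- empty or starting with the same value), A's 'temp_sum == 0' sentinel re-fires on the
-- second element and A appends items without the minimal index sum; B returns exactly
-- the items with minimal index sum, as the docstring specifies.
def D_find_common_items_minimum_index_sum (list1 : List Int) (list2 : List Int) : Prop :=
  2 ≤ list1.length ∧ (list2 = [] ∨ list2.head? = list1.head?)
instance (list1 : List Int) (list2 : List Int) : Decidable (D_find_common_items_minimum_index_sum list1 list2) := by unfold D_find_common_items_minimum_index_sum; infer_instance

def Spec_find_common_items_minimum_index_sum (list1 : List Int) (list2 : List Int) (out : List Int) : Prop := ¬ D_find_common_items_minimum_index_sum list1 list2 → out = find_common_items_minimum_index_sum_alt list1 list2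
instance (list1 : List Int) (list2 : List Int) (out : List Int) : Decidable (Spec_find_common_items_minimum_index_sum list1 list2 out) := by unfold Spec_find_common_items_minimum_index_sum; infer_instance

def pvDiffWitness_find_common_items_minimum_index_sum : List Int × List Int := ([1, 2], [1])
def pvDiffWitnessOut_find_common_items_minimum_index_sum : (List Int) × (List Int) := ([1, 2], [1])

-- ===== CLAIM (what is proved, stated in full; the proofs are below) =====
def Claim_unchanged_find_common_items_minimum_index_sum : Prop := ∀ (list1 : List Int) (list2 : List Int), Dom_find_common_items_minimum_index_sum list1 list2 → Spec_find_common_items_minimum_index_sum list1 list2 (find_common_items_minimum_index_sum list1 list2)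
def Claim_changed_find_common_items_minimum_index_sum : Prop := Dom_find_common_items_minimum_index_sum (pvDiffWitness_find_common_items_minimum_index_sum.1) (pvDiffWitness_find_common_items_minimum_index_sum.2) ∧ D_find_common_items_minimum_index_sum (pvDiffWitness_find_common_items_minimum_index_sum.1) (pvDiffWitness_find_common_items_minimum_index_sum.2) ∧ find_common_items_minimum_index_sum (pvDiffWitness_find_common_items_minimum_index_sum.1) (pvDiffWitness_find_common_items_minimum_index_sum.2) = pvDiffWitnessOut_find_common_items_minimum_index_sum.1 ∧ find_common_items_minimum_index_sum_alt (pvDiffWitness_find_common_items_minimum_index_sum.1) (pvDiffWitness_find_common_items_minimum_index_sum.2) = pvDiffWitnessOut_find_common_items_minimum_index_sum.2 ∧ pvDiffWitnessOut_find_common_items_minimum_index_sum.1 ≠ pvDiffWitnessOut_find_common_items_minimum_index_sum.2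

-- ===== LEMMAS AND PROOFS =====

-- the shared step function over (value, index-sum) pairs
def pvStep (st : Int × List Int) (q : Int × Int) : Int × List Int :=
  if st.1 = 0 ∨ st.1 = q.2 then (q.2, st.2 ++ [q.1])
  else if q.2 < st.1 then (q.2, [q.1])
  else st

-- the (value, index-sum) pairs both programs are about
def pvPairs (list1 : List Int) (list2 : List Int) : List (Int × Int) :=
  (PySem.List.enumerate list1 0).map (fun p => (p.2, p.1 + (pvWhileJ p.2 list2 : Int)))

-- A's while loop from 0 computes the first index of v in list2, or its length.
theorem pvWhileJ_eq_index? (v : Int) (list2 : List Int) :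
    pvWhileJ v list2 = (PySem.List.index? list2 v).getD list2.length := by
  induction list2 with
  | nil => simp [pvWhileJ]
  | cons x xs ih =>
      by_cases hv : v = x
      · subst hv
        rw [PySem.List.index?_cons_self]
        simp [pvWhileJ]
      · rw [PySem.List.index?_cons_of_ne xs (Ne.symm hv)]
        simp only [pvWhileJ, hv, ne_eq, not_false_iff, if_pos, if_true, ih]
        cases PySem.List.index? xs v <;> simp

-- B's setdefault fold records the first list2-index of each value.
theorem pvFirstIndex_fold_get? (xs : List Int) (s : Int) (d : PySem.Dict Int Int) (v : Int) :
    ((PySem.List.enumerate xs s).foldl (fun d p => d.setdefault p.2 p.1) d).get? v =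
      if d.contains v then d.get? v
      else (PySem.List.index? xs v).map (fun k => s + (k : Int)) := by
  induction xs generalizing s d with
  | nil =>
      cases h : d.get? v with
      | none => simp [PySem.List.enumerate, PySem.List.index?, PySem.Dict.contains_eq_isSome_get?, h]
      | some w => simp [PySem.List.enumerate, PySem.Dict.contains_eq_isSome_get?, h]
  | cons x xs ih =>
      rw [PySem.List.enumerate_cons]
      simp only [List.foldl_cons]
      rw [ih]
      by_cases hv : v = x
      · subst hv
        rw [PySem.Dict.contains_setdefault, PySem.Dict.get?_setdefault_self,
          PySem.List.index?_cons_self]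
        simp only [BEq.refl, Bool.true_or, if_true]
        rw [PySem.Dict.contains_eq_isSome_get?]
        cases d.get? v <;> simp
      · rw [PySem.Dict.contains_setdefault, PySem.Dict.get?_setdefault_of_ne _ _ hv,
          PySem.List.index?_cons_of_ne xs (Ne.symm hv)]
        have : (v == x) = false := by simp [hv]
        rw [this]
        simp only [Bool.false_or]
        by_cases hc : d.contains v
        · simp [hc]
        · simp only [hc]
          cases PySem.List.index? xs v with
          | none => rfl
          | some k => simp; ring_nf

-- the dict lookup with default len(list2) equals A's while-scan result.
theorem pvLookup_eq_whileJ (list2 : List Int) (v : Int) :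
    (pvFirstIndex list2).getD v (PySem.List.len list2) = (pvWhileJ v list2 : Int) := by
  rw [pvWhileJ_eq_index?]
  unfold pvFirstIndex
  rw [PySem.Dict.getD, pvFirstIndex_fold_get?]
  simp only [PySem.Dict.contains_empty, PySem.Dict.get?_empty]
  cases h : PySem.List.index? list2 v <;> simp [PySem.List.len]

-- folding min never rises above its start
theorem pvFoldMin_le (qs : List (Int × Int)) (t : Int) :
    qs.foldl (fun a q => min a q.2) t ≤ t := by
  induction qs generalizing t with
  | nil => simp
  | cons q rest ih => exact le_trans (ih (min t q.2)) (min_le_left _ _)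

-- the running-minimum state machine equals min-then-filter, away from the 0 sentinel
theorem pvStep_foldl_eq (qs : List (Int × Int)) (t : Int) (acc : List Int)
    (ht : 0 < t) (hq : ∀ q ∈ qs, 0 < q.2) :
    qs.foldl pvStep (t, acc) =
      (qs.foldl (fun a q => min a q.2) t,
        (if qs.foldl (fun a q => min a q.2) t = t then acc else []) ++
          (qs.filter (fun q => q.2 == qs.foldl (fun a q => min a q.2) t)).map Prod.fst) := by
  induction qs generalizing t acc with
  | nil => simp
  | cons q rest ih =>
      have hq0 : 0 < q.2 := hq q (by simp)
      have hrest : ∀ p ∈ rest, 0 < p.2 := fun p hp => hq p (by simp [hp])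
      simp only [List.foldl_cons, List.filter_cons]
      by_cases hte : t = q.2
      · have hstep : pvStep (t, acc) q = (q.2, acc ++ [q.1]) := by
          simp [pvStep, hte]
        rw [hstep, ih _ _ hq0 hrest]
        have hmin : min t q.2 = q.2 := by omega
        simp only [hmin]
        set M := rest.foldl (fun a q => min a q.2) q.2 with hM
        have hMle : M ≤ q.2 := pvFoldMin_le rest q.2
        by_cases hMt : M = q.2
        · simp [hMt, hte, beq_iff_eq]
        · have : ¬ (q.2 == M) = true := by simp [beq_iff_eq]; omega
          simp [hMt, hte, this]
      · have hstep : pvStep (t, acc) q =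
            if q.2 < t then (q.2, [q.1]) else (t, acc) := by
          have h0 : ¬ t = 0 := by omega
          simp [pvStep, hte, h0]
        by_cases hlt : q.2 < t
        · rw [hstep, if_pos hlt, ih _ _ hq0 hrest]
          have hmin : min t q.2 = q.2 := by omega
          simp only [hmin]
          set M := rest.foldl (fun a q => min a q.2) q.2 with hM
          have hMle : M ≤ q.2 := pvFoldMin_le rest q.2
          have hMt : ¬ M = t := by omega
          by_cases hMq : M = q.2
          · simp [hMt, hMq, beq_iff_eq]
            exact fun h => absurd h (by omega)
          · have : ¬ (q.2 == M) = true := by simp [beq_iff_eq]; omega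
            simp [hMt, hMq, this]
        · rw [hstep, if_neg hlt, ih _ _ ht hrest]
          have hmin : min t q.2 = t := by omega
          simp only [hmin]
          set M := rest.foldl (fun a q => min a q.2) t with hM
          have hMle : M ≤ t := pvFoldMin_le rest t
          have : ¬ (q.2 == M) = true := by simp [beq_iff_eq]; omega
          simp [this]

-- A as a fold of pvStep over pvPairs
theorem pvA_eq (list1 list2 : List Int) :
    find_common_items_minimum_index_sum list1 list2 =
      ((pvPairs list1 list2).foldl pvStep (0, [])).2 := by
  unfold find_common_items_minimum_index_sum pvPairs
  rw [PySem.List.enumerate_eq_map_pyRange list1 0]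
  simp only [List.map_map, List.foldl_map, pvStep, Function.comp]

-- zipping a list with a map over its enumeration pairs up elementwise
theorem pvZipEnum (xs : List Int) (s : Int) (g : Int × Int → Int) :
    xs.zip ((PySem.List.enumerate xs s).map g) =
      (PySem.List.enumerate xs s).map (fun p => (p.2, g p)) := by
  induction xs generalizing s with
  | nil => simp [PySem.List.enumerate_nil]
  | cons x xs ih => simp [PySem.List.enumerate_cons, ih]

-- B as min-then-filter over pvPairs
theorem pvB_eq (list1 list2 : List Int) (h : list1 ≠ []) :
    find_common_items_minimum_index_sum_alt list1 list2 =
      ((pvPairs list1 list2).filter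
        (fun q => q.2 == (pvPairs list1 list2).foldl (fun a q => min a q.2)
          ((pvPairs list1 list2).headD (0, 0)).2)).map Prod.fst := by
  obtain ⟨v, rest, rfl⟩ : ∃ v rest, list1 = v :: rest := by
    cases list1 with
    | nil => exact absurd rfl h
    | cons v rest => exact ⟨v, rest, rfl⟩
  unfold find_common_items_minimum_index_sum_alt
  rw [if_neg h]
  dsimp only
  rw [pvZipEnum]
  have hP : ((PySem.List.enumerate (v :: rest) 0).map
      (fun p => (p.2, p.1 + (pvFirstIndex list2).getD p.2 (PySem.List.len list2)))) =
      pvPairs (v :: rest) list2 := by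
    unfold pvPairs
    simp only [pvLookup_eq_whileJ]
  have hsums : ((PySem.List.enumerate (v :: rest) 0).map
      (fun p => p.1 + (pvFirstIndex list2).getD p.2 (PySem.List.len list2))) =
      (pvPairs (v :: rest) list2).map (fun q => q.2) := by
    rw [← hP, List.map_map]
    simp [Function.comp_def]
  rw [hP, hsums]
  have hpairs : pvPairs (v :: rest) list2 =
      (v, 0 + (pvWhileJ v list2 : Int)) ::
        (PySem.List.enumerate rest 1).map (fun p => (p.2, p.1 + (pvWhileJ p.2 list2 : Int))) := by
    unfold pvPairs
    rw [PySem.List.enumerate_cons]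
    simp
  rw [hpairs]
  simp only [List.map_cons, PySem.List.min?_id_cons, Option.getD_some, List.headD_cons,
    List.foldl_cons, List.foldl_map, min_self]

-- ===== VERDICT (by name: the statements are the Claim_ definitions above) =====
theorem find_common_items_minimum_index_sum_spec : Claim_unchanged_find_common_items_minimum_index_sum := by
  intro list1 list2 _
  unfold Spec_find_common_items_minimum_index_sum
  intro hD
  unfold D_find_common_items_minimum_index_sum at hD
  push_neg at hD
  cases list1 with
  | nil =>
      rw [pvA_eq]
      simp [pvPairs, PySem.List.enumerate_nil, find_common_items_minimum_index_sum_alt]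
  | cons v rest =>
      rw [pvA_eq, pvB_eq _ _ (by simp)]
      have hpairs : pvPairs (v :: rest) list2 =
          (v, 0 + (pvWhileJ v list2 : Int)) ::
            (PySem.List.enumerate rest 1).map (fun p => (p.2, p.1 + (pvWhileJ p.2 list2 : Int))) := by
        unfold pvPairs
        rw [PySem.List.enumerate_cons]
        simp
      rw [hpairs]
      cases hr : rest with
      | nil =>
          simp [PySem.List.enumerate_nil, pvStep]
      | cons r rs =>
          have h2 : 2 ≤ (v :: rest).length := by subst hr; simp
          obtain ⟨x, xs, rfl⟩ : ∃ x xs, list2 = x :: xs := by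
            cases list2 with
            | nil => exact absurd rfl ((hD h2).1)
            | cons x xs => exact ⟨x, xs, rfl⟩
          have hvx : ¬ v = x := by
            have := (hD h2).2
            simp only [List.head?_cons] at this
            exact fun h => this (by rw [h])
          have hw : 0 < (pvWhileJ v (x :: xs) : Int) := by
            simp [pvWhileJ, hvx]
          subst hr
          have hqpos : ∀ q ∈ (PySem.List.enumerate (r :: rs) 1).map
              (fun p => (p.2, p.1 + (pvWhileJ p.2 (x :: xs) : Int))), 0 < q.2 := by
            intro q hq
            obtain ⟨p, hp, rfl⟩ := List.mem_map.mp hq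
            obtain ⟨k, hk, rfl⟩ := (PySem.List.mem_enumerate_iff _ _ _).mp hp
            have : (0 : Int) ≤ (pvWhileJ (r :: rs)[k] (x :: xs) : Int) := Int.natCast_nonneg _
            simp only
            omega
          simp only [List.foldl_cons, List.headD_cons]
          have hstep0 : pvStep (0, []) (v, 0 + (pvWhileJ v (x :: xs) : Int)) =
              (0 + (pvWhileJ v (x :: xs) : Int), [v]) := by
            simp [pvStep]
          rw [hstep0, pvStep_foldl_eq _ _ _ (by omega) hqpos]
          set qrest := (PySem.List.enumerate (r :: rs) 1).map
            (fun p => (p.2, p.1 + (pvWhileJ p.2 (x :: xs) : Int))) with hqr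
          set t := 0 + (pvWhileJ v (x :: xs) : Int) with htdef
          have hmm : min t t = t := min_self t
          rw [hmm]
          set M := qrest.foldl (fun a q => min a q.2) t with hM
          by_cases hMt : M = t
          · simp [List.filter_cons, hMt, beq_iff_eq]
          · have : ¬ (t == M) = true := by simp [beq_iff_eq]; omega
            simp [List.filter_cons, hMt, this]

theorem find_common_items_minimum_index_sum_changed : Claim_changed_find_common_items_minimum_index_sum := by
  unfold Claim_changed_find_common_items_minimum_index_sum; decide
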